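-- pv_equiv track=rewrite | github.com/tappj/Inverted-Indexer | search_engine/search.py | terms_are_close
-- ===== SOURCE A (Python) =====
-- def terms_are_close(positions_dict, terms, window=5):
--     if len(terms) < 2:
--         return False
--     all_pos = [positions_dict.get(t, []) for t in terms]
--     if any(len(p) == 0 for p in all_pos):
--         return False
--     for p1 in all_pos[0]:
--         for p2 in all_pos[1]:
--             if abs(p1 - p2) <= window:
--                 return True
--     return False
-- ===== SOURCE B (Python) =====
-- def terms_are_close(positions_dict, terms, window=5):
--     # B: sort the two position lists once, then a two-pointer sweep (O(n log n + m log m) vs A's O(n*m))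
--     if len(terms) < 2:
--         return False
--     if any(not positions_dict.get(t, []) for t in terms):
--         return False
--     xs = sorted(positions_dict.get(terms[0], []))
--     ys = sorted(positions_dict.get(terms[1], []))
--     i = j = 0
--     while i < len(xs) and j < len(ys):
--         if abs(xs[i] - ys[j]) <= window:
--             return True
--         if xs[i] < ys[j]:
--             i += 1
--         else:
--             j += 1
--     return False
-- ===== Notes on version B (the rewrite author's own statement) =====
-- stated objective: faster
-- what changed: A scans all n*m pairs of the two position lists; B sorts both lists once and runs a two-pointer sweep, so each position is visited once after sorting.
import Mathlib
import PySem

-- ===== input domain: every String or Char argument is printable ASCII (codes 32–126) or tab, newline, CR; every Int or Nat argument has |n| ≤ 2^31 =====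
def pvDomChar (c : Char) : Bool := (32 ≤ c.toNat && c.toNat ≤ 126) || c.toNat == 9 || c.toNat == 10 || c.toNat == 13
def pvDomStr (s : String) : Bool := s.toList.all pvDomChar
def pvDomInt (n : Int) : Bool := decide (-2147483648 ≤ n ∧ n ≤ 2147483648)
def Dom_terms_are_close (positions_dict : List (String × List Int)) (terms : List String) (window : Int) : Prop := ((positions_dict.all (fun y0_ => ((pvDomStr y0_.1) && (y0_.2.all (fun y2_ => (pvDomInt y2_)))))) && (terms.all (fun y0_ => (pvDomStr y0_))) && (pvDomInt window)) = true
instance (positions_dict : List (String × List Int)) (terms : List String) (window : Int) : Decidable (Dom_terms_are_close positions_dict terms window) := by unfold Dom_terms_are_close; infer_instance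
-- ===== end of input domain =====

-- B replaces A's nested scan over all position pairs by sort-then-two-pointer sweep (objective: faster).

-- ===== PORT A =====
-- positions_dict.get(t, [])
def pvGet (positions_dict : List (String × List Int)) (t : String) : List Int :=
  (PySem.Dict.mk positions_dict).getD t []

def terms_are_close (positions_dict : List (String × List Int)) (terms : List String) (window : Int) : Bool :=
  if terms.length < 2 then false
  else
    let all_pos := terms.map (fun t => pvGet positions_dict t)
    if all_pos.any (fun p => p.length == 0) then false
    else
      (PySem.List.pyGetD all_pos 0 []).any (fun p1 =>
        (PySem.List.pyGetD all_pos 1 []).any (fun p2 => decide (|p1 - p2| ≤ window)))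

-- ===== PORT B =====
-- B's while loop over indices i, j, as recursion on the two (sorted) lists;
-- the fuel argument (an upper bound on the remaining steps) only makes the recursion structural
def pvTwoPointerFuel : Nat → List Int → List Int → Int → Bool
  | n + 1, x :: xs, y :: ys, w =>
    if |x - y| ≤ w then true
    else if x < y then pvTwoPointerFuel n xs (y :: ys) w
    else pvTwoPointerFuel n (x :: xs) ys w
  | _, _, _, _ => false

def pvTwoPointer (xs ys : List Int) (w : Int) : Bool :=
  pvTwoPointerFuel (xs.length + ys.length) xs ys w

def terms_are_close_alt (positions_dict : List (String × List Int)) (terms : List String) (window : Int) : Bool :=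
  if terms.length < 2 then false
  else if terms.any (fun t => pvGet positions_dict t == []) then false
  else
    let xs := PySem.List.sorted (pvGet positions_dict (PySem.List.pyGetD terms 0 "")) (fun x => x) false
    let ys := PySem.List.sorted (pvGet positions_dict (PySem.List.pyGetD terms 1 "")) (fun x => x) false
    pvTwoPointer xs ys window

-- ===== PRECONDITION & SPEC =====
def Spec_terms_are_close (positions_dict : List (String × List Int)) (terms : List String) (window : Int) (out : Bool) : Prop := out = terms_are_close_alt positions_dict terms window
instance (positions_dict : List (String × List Int)) (terms : List String) (window : Int) (out : Bool) : Decidable (Spec_terms_are_close positions_dict terms window out) := by unfold Spec_terms_are_close; infer_instance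

-- ===== CLAIM (what is proved, stated in full; the proofs are below) =====
def Claim_equal_terms_are_close : Prop := ∀ (positions_dict : List (String × List Int)) (terms : List String) (window : Int), Dom_terms_are_close positions_dict terms window → Spec_terms_are_close positions_dict terms window (terms_are_close positions_dict terms window)

-- ===== LEMMAS AND PROOFS =====

-- two-pointer sweep on two (≤)-sorted lists finds a pair within the window iff one exists
theorem pvTwoPointer_iff (xs ys : List Int) (w : Int)
    (hx : xs.Pairwise (· ≤ ·)) (hy : ys.Pairwise (· ≤ ·)) :
    pvTwoPointer xs ys w = true ↔ ∃ x ∈ xs, ∃ y ∈ ys, |x - y| ≤ w := by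
  unfold pvTwoPointer
  generalize hn : xs.length + ys.length = n
  induction n generalizing xs ys with
  | zero =>
    have : xs = [] := List.eq_nil_of_length_eq_zero (by omega)
    subst this
    simp [pvTwoPointerFuel]
  | succ n ih =>
    cases xs with
    | nil => simp [pvTwoPointerFuel]
    | cons x xs =>
      cases ys with
      | nil => simp [pvTwoPointerFuel]
      | cons y ys =>
        rw [pvTwoPointerFuel]
        by_cases h : |x - y| ≤ w
        · rw [if_pos h]
          exact iff_of_true rfl ⟨x, by simp, y, by simp, h⟩
        · rw [if_neg h]
          by_cases hlt : x < y
          · rw [if_pos hlt]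
            rw [ih xs (y :: ys) hx.tail hy (by simp at hn ⊢; omega)]
            constructor
            · rintro ⟨x', hx', y', hy', hw⟩
              exact ⟨x', List.mem_cons_of_mem _ hx', y', hy', hw⟩
            · rintro ⟨x', hx', y', hy', hw⟩
              rcases List.mem_cons.mp hx' with rfl | hx''
              · -- x' = x: every y' in y :: ys has y ≤ y', and y - x > w, contradiction
                exfalso
                have hyy : y ≤ y' := by
                  rcases List.mem_cons.mp hy' with rfl | h'
                  · exact le_refl _
                  · exact (List.pairwise_cons.mp hy).1 _ h'
                have h' : w < |x' - y| := not_le.mp h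
                rw [abs_sub_comm, abs_of_nonneg (by omega : (0:ℤ) ≤ y - x')] at h'
                rw [abs_sub_le_iff] at hw
                omega
              · exact ⟨x', hx'', y', hy', hw⟩
          · rw [if_neg hlt]
            rw [ih (x :: xs) ys hx hy.tail (by simp at hn ⊢; omega)]
            constructor
            · rintro ⟨x', hx', y', hy', hw⟩
              exact ⟨x', hx', y', List.mem_cons_of_mem _ hy', hw⟩
            · rintro ⟨x', hx', y', hy', hw⟩
              rcases List.mem_cons.mp hy' with rfl | hy''
              · exfalso
                have hxx : x ≤ x' := by
                  rcases List.mem_cons.mp hx' with rfl | h'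
                  · exact le_refl _
                  · exact (List.pairwise_cons.mp hx).1 _ h'
                have hylex : y' ≤ x := not_lt.mp hlt
                have h' : w < |x - y'| := not_le.mp h
                rw [abs_of_nonneg (by omega : (0:ℤ) ≤ x - y')] at h'
                rw [abs_sub_le_iff] at hw
                omega
              · exact ⟨x', hx', y', hy'', hw⟩

theorem pvGetD_zero' {α : Type} (x : α) (xs : List α) (d : α) :
    PySem.List.pyGetD (x :: xs) 0 d = x := by
  simp [PySem.List.pyGetD]

theorem pvGetD_one' {α : Type} (x y : α) (xs : List α) (d : α) :
    PySem.List.pyGetD (x :: y :: xs) 1 d = y := by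
  simp [PySem.List.pyGetD]

-- ===== VERDICT (by name: the statement is the Claim_ definition above) =====

theorem terms_are_close_spec : Claim_equal_terms_are_close := by
  intro pd terms w _
  unfold Spec_terms_are_close terms_are_close terms_are_close_alt
  by_cases hlen : terms.length < 2
  · simp [hlen]
  · obtain ⟨t0, t1, rest, rfl⟩ : ∃ t0 t1 rest, terms = t0 :: t1 :: rest := by
      match terms with
      | [] => exact absurd (by simp) hlen
      | [a] => exact absurd (by simp) hlen
      | a :: b :: r => exact ⟨a, b, r, rfl⟩
    simp only [hlen, if_false]
    have hcond : (((t0 :: t1 :: rest).map (fun t => pvGet pd t)).any (fun p => p.length == 0))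
        = ((t0 :: t1 :: rest).any (fun t => pvGet pd t == [])) := by
      rw [List.any_map]
      congr 1
      funext t
      cases hpt : pvGet pd t with
      | nil => simp [Function.comp, hpt]
      | cons a l => simp [Function.comp, hpt]
    rw [hcond]
    by_cases hemp : ((t0 :: t1 :: rest).any (fun t => pvGet pd t == [])) = true
    · simp only [hemp, if_true]
    · rw [Bool.not_eq_true] at hemp
      simp only [hemp, Bool.false_eq_true, if_false]
      rw [List.map_cons, List.map_cons,
          pvGetD_zero', pvGetD_one' (pvGet pd t0) (pvGet pd t1),
          pvGetD_zero', pvGetD_one' t0 t1]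
      have htp := pvTwoPointer_iff (PySem.List.sorted (pvGet pd t0) (fun x => x) false)
        (PySem.List.sorted (pvGet pd t1) (fun x => x) false) w
        (PySem.List.sorted_pairwise _ _) (PySem.List.sorted_pairwise _ _)
      rw [Bool.eq_iff_iff, htp]
      simp only [List.any_eq_true, decide_eq_true_eq, PySem.List.mem_sorted]
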